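-- pv_equiv track=rewrite | github.com/SeanAdams10/AdventOfCodePython | 2015/Day14/day_14.py | distance_calc
-- ===== SOURCE A (Python) =====
-- def distance_calc (parsed_data, time):
--
--     distance_list = []
--     for _, speed, fly, rest in parsed_data:
--         total = fly + rest
--         cycles = time // total
--         remainder = time % total
--         distance = cycles * fly * speed + min(fly, remainder) * speed
--
--         distance_list.append(distance)
--
--     return distance_list
-- ===== SOURCE B (Python) =====
-- def distance_calc(parsed_data, time):
--     # Division-free: the cycle count and remainder are computed by recursive
--     # binary (doubling) long division with Python's floor-division semantics.
--     def divmod_pos(t, d):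
--         # 0 <= t, 0 < d: classic doubling long division
--         if t < d:
--             return 0, t
--         q, r = divmod_pos(t, 2 * d)
--         if r >= d:
--             return 2 * q + 1, r - d
--         return 2 * q, r
--
--     def floor_divmod(t, d):
--         # Python's divmod(t, d) for any signs of t and nonzero d
--         if d < 0:
--             q, r0 = floor_divmod(-t, -d)
--             return q, -r0
--         if t < 0:
--             q, r = divmod_pos(-t, d)
--             if r == 0:
--                 return -q, 0
--             return -q - 1, d - r
--         return divmod_pos(t, d)
--
--     result = []
--     for _, speed, fly, rest in parsed_data:
--         cycles, remainder = floor_divmod(time, fly + rest)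
--         result.append((cycles * fly + min(fly, remainder)) * speed)
--     return result
-- ===== Notes on version B (the rewrite author's own statement) =====
-- stated objective: alternative
-- what changed: B computes each reindeer's cycle count and remainder without the // and % operators, using a recursive doubling (binary long-division) routine plus explicit sign handling, then derives the distance from that quotient/remainder pair; A calls the built-in floor division directly.
-- outside the precondition, e.g. on distance_calc([('a', 1, 0, 0)], 5): A raises ZeroDivisionError, B raises RecursionError
import Mathlib
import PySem

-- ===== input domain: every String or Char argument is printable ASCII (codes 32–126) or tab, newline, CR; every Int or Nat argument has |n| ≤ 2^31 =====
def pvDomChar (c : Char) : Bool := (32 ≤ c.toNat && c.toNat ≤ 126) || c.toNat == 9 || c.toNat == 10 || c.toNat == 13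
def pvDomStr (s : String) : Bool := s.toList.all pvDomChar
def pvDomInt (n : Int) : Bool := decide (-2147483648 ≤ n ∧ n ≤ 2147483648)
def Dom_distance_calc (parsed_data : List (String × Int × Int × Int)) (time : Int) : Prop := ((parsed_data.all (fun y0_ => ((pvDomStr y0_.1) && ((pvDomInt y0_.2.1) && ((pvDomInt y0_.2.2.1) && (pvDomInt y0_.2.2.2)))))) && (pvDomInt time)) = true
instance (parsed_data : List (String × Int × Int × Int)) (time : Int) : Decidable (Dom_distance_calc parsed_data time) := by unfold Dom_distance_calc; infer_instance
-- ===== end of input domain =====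

-- B computes each quotient/remainder pair by a recursive doubling (binary long-division) routine with explicit sign handling instead of A's built-in floor division; alternative algorithm, similar cost.


-- ===== PORT A =====
def distance_calc (parsed_data : List (String × Int × Int × Int)) (time : Int) : List Int :=
  parsed_data.foldl
    (fun distance_list e =>
      let speed := e.2.1
      let fly := e.2.2.1
      let rest := e.2.2.2
      let total := fly + rest
      let cycles := PySem.Int.floordiv time total
      let remainder := PySem.Int.mod time total
      let distance := cycles * fly * speed + min fly remainder * speed
      distance_list ++ [distance])
    []

-- ===== PORT B =====
-- Source B's divmod_pos: doubling long division for 0 ≤ t, 0 < d.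
-- (The 'd ≤ 0' guard only makes the Lean function total; Python recurses
-- forever there and such inputs are outside Pre_.)
def pvDivmodPos (t d : Int) : Int × Int :=
  if _h0 : d ≤ 0 then (0, t)
  else if _h1 : t < d then (0, t)
  else
    let qr := pvDivmodPos t (2 * d)
    if qr.2 ≥ d then (2 * qr.1 + 1, qr.2 - d) else (2 * qr.1, qr.2)
termination_by (t + 1 - d).toNat
decreasing_by omega

-- Source B's floor_divmod: Python divmod for any signs, nonzero d.
def pvFloorDivmod (t d : Int) : Int × Int :=
  if d < 0 then
    let qr := pvFloorDivmod (-t) (-d)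
    (qr.1, -qr.2)
  else if t < 0 then
    let qr := pvDivmodPos (-t) d
    if qr.2 = 0 then (-qr.1, 0) else (-qr.1 - 1, d - qr.2)
  else pvDivmodPos t d
termination_by (if d < 0 then 1 else 0)
decreasing_by simp_all; omega

def distance_calc_alt (parsed_data : List (String × Int × Int × Int)) (time : Int) : List Int :=
  parsed_data.foldl
    (fun result e =>
      let qr := pvFloorDivmod time (e.2.2.1 + e.2.2.2)
      result ++ [(qr.1 * e.2.2.1 + min e.2.2.1 qr.2) * e.2.1])
    []

-- ===== PRECONDITION & SPEC =====
-- Pre_ excludes exactly the inputs where some reindeer has fly + rest = 0, on which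
-- Python A raises ZeroDivisionError (B's recursion does not terminate there either).
def Pre_distance_calc (parsed_data : List (String × Int × Int × Int)) (time : Int) : Prop :=
  ∀ e ∈ parsed_data, e.2.2.1 + e.2.2.2 ≠ 0
instance (parsed_data : List (String × Int × Int × Int)) (time : Int) : Decidable (Pre_distance_calc parsed_data time) := by unfold Pre_distance_calc; infer_instance

def pvWitness_distance_calc : (List (String × Int × Int × Int)) × Int :=
  ([("Comet", 14, 10, 127), ("Dancer", 16, 11, 162)], 1000)

def Spec_distance_calc (parsed_data : List (String × Int × Int × Int)) (time : Int) (out : List Int) : Prop := out = distance_calc_alt parsed_data time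
instance (parsed_data : List (String × Int × Int × Int)) (time : Int) (out : List Int) : Decidable (Spec_distance_calc parsed_data time out) := by unfold Spec_distance_calc; infer_instance

-- ===== CLAIM (what is proved, stated in full; the proofs are below) =====
def Claim_equal_distance_calc : Prop := ∀ (parsed_data : List (String × Int × Int × Int)) (time : Int), Dom_distance_calc parsed_data time → Pre_distance_calc parsed_data time → Spec_distance_calc parsed_data time (distance_calc parsed_data time)

-- ===== LEMMAS AND PROOFS =====

-- Quotient/remainder uniqueness against PySem's floor division (positive divisor).
theorem pvUniq (a b q r : Int) (h0 : 0 ≤ r) (h1 : r < b) (h : a = q * b + r) :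
    PySem.Int.floordiv a b = q ∧ PySem.Int.mod a b = r := by
  have hb : 0 < b := by omega
  have h2 := PySem.Int.floordiv_mul_add_mod a b
  have h3 := PySem.Int.mod_nonneg a hb
  have h4 := PySem.Int.mod_lt a hb
  set Q := PySem.Int.floordiv a b
  set R := PySem.Int.mod a b
  have hq : Q = q := by
    by_contra hne
    rcases lt_or_gt_of_ne hne with hlt | hgt
    · nlinarith
    · nlinarith
  exact ⟨hq, by rw [hq] at h2; omega⟩

-- Source B's divmod_pos satisfies the Euclidean property on 0 ≤ t, 0 < d
-- (induction on the doubling measure).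
theorem pvDivmodPos_spec (n : Nat) (t d : Int) (hn : (t + 1 - d).toNat ≤ n)
    (ht : 0 ≤ t) (hd : 0 < d) :
    (pvDivmodPos t d).1 * d + (pvDivmodPos t d).2 = t ∧
      0 ≤ (pvDivmodPos t d).2 ∧ (pvDivmodPos t d).2 < d := by
  induction n generalizing t d with
  | zero =>
      have hlt : t < d := by omega
      rw [pvDivmodPos]
      simp [not_le.mpr hd, hlt]
      omega
  | succ n ih =>
      rw [pvDivmodPos]
      by_cases hlt : t < d
      · simp [not_le.mpr hd, hlt]; omega
      · have H := ih t (2 * d) (by omega) ht (by omega)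
        simp only [dif_neg (not_le.mpr hd), dif_neg hlt]
        by_cases hge : (pvDivmodPos t (2 * d)).2 ≥ d
        · simp only [if_pos hge]
          exact ⟨by nlinarith [H.1], by omega, by omega⟩
        · simp only [if_neg hge]
          exact ⟨by nlinarith [H.1], by omega, by omega⟩

-- hence divmod_pos computes exactly Python's t // d, t % d there.
theorem pvDivmodPos_eq (t d : Int) (ht : 0 ≤ t) (hd : 0 < d) :
    pvDivmodPos t d = (PySem.Int.floordiv t d, PySem.Int.mod t d) := by
  have H := pvDivmodPos_spec (t + 1 - d).toNat t d le_rfl ht hd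
  have := pvUniq t d (pvDivmodPos t d).1 (pvDivmodPos t d).2 H.2.1 H.2.2 (by linarith [H.1])
  exact Prod.ext (this.1.symm) (this.2.symm)

-- Source B's floor_divmod computes Python's divmod for every nonzero divisor.
theorem pvFloorDivmod_eq (t d : Int) (hd : d ≠ 0) :
    pvFloorDivmod t d = (PySem.Int.floordiv t d, PySem.Int.mod t d) := by
  rcases lt_or_gt_of_ne hd with hneg | hpos
  · rw [pvFloorDivmod, if_pos hneg]
    have hrec : pvFloorDivmod (-t) (-d) =
        (PySem.Int.floordiv (-t) (-d), PySem.Int.mod (-t) (-d)) := by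
      rcases le_or_gt 0 (-t) with h | h
      · rw [pvFloorDivmod, if_neg (show ¬ -d < 0 by omega), if_neg (show ¬ -t < 0 by omega)]
        exact pvDivmodPos_eq _ _ h (by omega)
      · rw [pvFloorDivmod, if_neg (show ¬ -d < 0 by omega), if_pos (show -t < 0 by omega)]
        have hDP := pvDivmodPos_eq (-(-t)) (-d) (by omega) (by omega)
        rw [hDP]
        by_cases hz : PySem.Int.mod (-(-t)) (-d) = 0
        · simp only [hz]
          have hQ := PySem.Int.floordiv_mul_add_mod (-(-t)) (-d)
          rw [hz] at hQ
          have := pvUniq (-t) (-d) (-(PySem.Int.floordiv (-(-t)) (-d))) 0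
            le_rfl (by omega) (by linarith)
          exact Prod.ext (this.1.symm) (this.2.symm)
        · simp only [if_neg hz]
          have hQ := PySem.Int.floordiv_mul_add_mod (-(-t)) (-d)
          have hR0 := PySem.Int.mod_nonneg (-(-t)) (show (0:Int) < -d by omega)
          have hR1 := PySem.Int.mod_lt (-(-t)) (show (0:Int) < -d by omega)
          have := pvUniq (-t) (-d) (-(PySem.Int.floordiv (-(-t)) (-d)) - 1)
            (-d - PySem.Int.mod (-(-t)) (-d)) (by omega) (by omega) (by ring_nf; ring_nf at hQ; omega)
          exact Prod.ext (this.1.symm) (this.2.symm)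
    rw [hrec]
    simp [PySem.Int.floordiv_neg_neg, PySem.Int.mod_neg_neg]
  · rcases le_or_gt 0 t with h | h
    · rw [pvFloorDivmod, if_neg (show ¬ d < 0 by omega), if_neg (show ¬ t < 0 by omega)]
      exact pvDivmodPos_eq t d h hpos
    · rw [pvFloorDivmod, if_neg (show ¬ d < 0 by omega), if_pos (show t < 0 by omega)]
      rw [pvDivmodPos_eq (-t) d (by omega) hpos]
      by_cases hz : PySem.Int.mod (-t) d = 0
      · simp only [hz]
        have hQ := PySem.Int.floordiv_mul_add_mod (-t) d
        rw [hz] at hQ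
        have := pvUniq t d (-(PySem.Int.floordiv (-t) d)) 0 le_rfl hpos (by linarith)
        exact Prod.ext (this.1.symm) (this.2.symm)
      · simp only [if_neg hz]
        have hQ := PySem.Int.floordiv_mul_add_mod (-t) d
        have hR0 := PySem.Int.mod_nonneg (-t) hpos
        have hR1 := PySem.Int.mod_lt (-t) hpos
        have := pvUniq t d (-(PySem.Int.floordiv (-t) d) - 1)
          (d - PySem.Int.mod (-t) d) (by omega) (by omega) (by ring_nf; ring_nf at hQ; omega)
        exact Prod.ext (this.1.symm) (this.2.symm)

-- ===== VERDICT (by name: the statement is the Claim_ definition above) =====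
theorem distance_calc_spec : Claim_equal_distance_calc := by
  intro parsed_data time _ hpre
  unfold Spec_distance_calc distance_calc distance_calc_alt
  rw [PySem.List.foldl_append_singleton_eq_map
      (fun e : String × Int × Int × Int =>
        PySem.Int.floordiv time (e.2.2.1 + e.2.2.2) * e.2.2.1 * e.2.1
          + min e.2.2.1 (PySem.Int.mod time (e.2.2.1 + e.2.2.2)) * e.2.1),
    PySem.List.foldl_append_singleton_eq_map
      (fun e : String × Int × Int × Int =>
        ((pvFloorDivmod time (e.2.2.1 + e.2.2.2)).1 * e.2.2.1
          + min e.2.2.1 (pvFloorDivmod time (e.2.2.1 + e.2.2.2)).2) * e.2.1)]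
  simp only [List.nil_append]
  apply List.map_congr_left
  intro e he
  rw [pvFloorDivmod_eq time (e.2.2.1 + e.2.2.2) (hpre e he)]
  ring
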